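-- pv_equiv track=rewrite | github.com/dat821168/bert_vn_ner | commons.py | recover_feature
-- ===== SOURCE A (Python) =====
-- def recover_feature(orginal_sentence, feature, type):
--     new_feature = []
--     for words in orginal_sentence:
--         word = words.split("_")
--         if (type + '0') in feature[0:len(word)]:
--             new_feature.append(type + '0')
--         else:
--             new_feature.append(type + '1')
--         del feature[0:len(word)]
--     return new_feature
-- ===== SOURCE B (Python) =====
-- def recover_feature(orginal_sentence, feature, type):
--     # Precompute word-chunk boundary offsets, then tag each chunk in one pass.
--     bounds = [0]
--     for words in orginal_sentence:
--         bounds.append(bounds[-1] + len(words.split("_")))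
--     tag0 = type + '0'
--     new_feature = [tag0 if tag0 in feature[a:b] else type + '1'
--                    for a, b in zip(bounds, bounds[1:])]
--     del feature[:bounds[-1]]
--     return new_feature
-- ===== Notes on version B (the rewrite author's own statement) =====
-- stated objective: alternative
-- what changed: Replaces A's interleaved consume-the-front loop (membership test on the mutating list's prefix, then delete it) by precomputing a prefix-sum boundary table once and tagging every word chunk in a single pass over slices of the untouched list, deleting the consumed front once at the end (same net mutation of `feature`).
import Mathlib
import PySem

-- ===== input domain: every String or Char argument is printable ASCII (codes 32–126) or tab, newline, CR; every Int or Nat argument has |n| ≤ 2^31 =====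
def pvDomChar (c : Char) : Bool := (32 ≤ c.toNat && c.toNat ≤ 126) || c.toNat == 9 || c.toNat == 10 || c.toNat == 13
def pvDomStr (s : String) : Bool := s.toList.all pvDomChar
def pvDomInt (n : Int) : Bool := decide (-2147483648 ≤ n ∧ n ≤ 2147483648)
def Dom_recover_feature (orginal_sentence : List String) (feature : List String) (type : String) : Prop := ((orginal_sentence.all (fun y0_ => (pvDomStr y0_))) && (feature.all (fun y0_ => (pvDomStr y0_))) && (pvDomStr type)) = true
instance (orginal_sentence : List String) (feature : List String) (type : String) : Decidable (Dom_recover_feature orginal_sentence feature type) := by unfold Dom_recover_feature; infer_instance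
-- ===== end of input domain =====

-- B replaces A's consume-the-front loop by a precomputed boundary (prefix-sum) table and a
-- single tagging pass over chunk slices (objective: alternative decomposition, same cost).
-- Both A and B mutate `feature` in place (delete the consumed front) in the same way; the
-- theorems below are about the return value.

-- ===== PORT A =====
-- words.split("_") (sep nonempty, never raises); both programs only use it this way
def pvSplit (w : String) : List (List Char) := PySem.Chars.splitOn w.toList "_".toList

-- A's loop: accumulate new_feature while deleting the consumed front of feature.
def recover_feature (orginal_sentence : List String) (feature : List String) (type : String) : List String :=
  (orginal_sentence.foldl
    (fun (st : List String × List String) words =>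
      let word := pvSplit words
      let tagged :=
        if (type ++ "0") ∈ PySem.List.slice st.2 (some 0) (some (word.length : Int)) then
          st.1 ++ [type ++ "0"]
        else
          st.1 ++ [type ++ "1"]
      (tagged, PySem.List.slice st.2 (some (word.length : Int)) none))
    ([], feature)).1

-- ===== PORT B =====
-- B: boundary offsets by prefix sums, then one tagging pass over the slices; bounds[-1] via pyGetD.
def recover_feature_alt (orginal_sentence : List String) (feature : List String) (type : String) : List String :=
  let bounds := orginal_sentence.foldl
    (fun (bs : List Int) words =>
      bs ++ [PySem.List.pyGetD bs (-1) 0 + ((pvSplit words).length : Int)])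
    [(0 : Int)]
  let tag0 := type ++ "0"
  ((bounds.zip (PySem.List.slice bounds (some 1) none)).map
    (fun ab => if tag0 ∈ PySem.List.slice feature (some ab.1) (some ab.2) then tag0 else type ++ "1"))

-- ===== PRECONDITION & SPEC =====
def Spec_recover_feature (orginal_sentence : List String) (feature : List String) (type : String) (out : List String) : Prop := out = recover_feature_alt orginal_sentence feature type
instance (orginal_sentence : List String) (feature : List String) (type : String) (out : List String) : Decidable (Spec_recover_feature orginal_sentence feature type out) := by unfold Spec_recover_feature; infer_instance

-- ===== CLAIM (what is proved, stated in full; the proofs are below) =====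
def Claim_equal_recover_feature : Prop := ∀ (orginal_sentence : List String) (feature : List String) (type : String), Dom_recover_feature orginal_sentence feature type → Spec_recover_feature orginal_sentence feature type (recover_feature orginal_sentence feature type)

-- ===== LEMMAS AND PROOFS =====

-- common recursive reading of the task: tag the first chunk, recurse on the rest
def pvGo (ty : String) : List String → List String → List String
  | [], _ => []
  | w :: ws, f =>
    let k := (pvSplit w).length
    (if (ty ++ "0") ∈ f.take k then ty ++ "0" else ty ++ "1") :: pvGo ty ws (f.drop k)

theorem pvA_foldl (ty : String) (os : List String) :
    ∀ (f acc : List String),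
      (os.foldl
        (fun (st : List String × List String) words =>
          let word := pvSplit words
          let tagged :=
            if (ty ++ "0") ∈ PySem.List.slice st.2 (some 0) (some (word.length : Int)) then
              st.1 ++ [ty ++ "0"]
            else
              st.1 ++ [ty ++ "1"]
          (tagged, PySem.List.slice st.2 (some (word.length : Int)) none))
        (acc, f)).1 = acc ++ pvGo ty os f := by
  induction os with
  | nil => intro f acc; simp [pvGo]
  | cons w ws ih =>
    intro f acc
    simp only [List.foldl_cons, pvGo]
    rw [PySem.List.slice_from_natCast]
    have hsl : PySem.List.slice f (some 0) (some (((pvSplit w).length : Nat) : Int))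
        = f.take (pvSplit w).length := by
      simp
    rw [hsl]
    split_ifs with h <;> rw [ih] <;> simp

-- proof-side boundary list: pvScan c ws = the offsets c, c+k₁, c+k₁+k₂, …
def pvScan (c : Nat) : List String → List Nat
  | [] => [c]
  | w :: ws => c :: pvScan (c + (pvSplit w).length) ws

theorem pvScan_head (c : Nat) (ws : List String) :
    ∃ t, pvScan c ws = c :: t := by
  cases ws <;> exact ⟨_, rfl⟩

theorem pvBounds_eq (ws : List String) :
    ∀ (bs : List Int) (c : Nat),
      (ws.foldl
        (fun (bs : List Int) words =>
          bs ++ [PySem.List.pyGetD bs (-1) 0 + ((pvSplit words).length : Int)])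
        (bs ++ [(c : Int)]))
      = bs ++ (pvScan c ws).map (Nat.cast : Nat → Int) := by
  induction ws with
  | nil => intro bs c; simp [pvScan]
  | cons w ws ih =>
    intro bs c
    simp only [List.foldl_cons]
    rw [PySem.List.pyGetD_neg_one_append_singleton]
    have : bs ++ [(c : Int)] ++ [(c : Int) + ((pvSplit w).length : Int)]
        = (bs ++ [(c : Int)]) ++ [((c + (pvSplit w).length : Nat) : Int)] := by
      push_cast; simp
    rw [this, ih]
    simp [pvScan]

theorem pvB_main (ty : String) (ws : List String) :
    ∀ (c : Nat) (f : List String),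
      (((pvScan c ws).map (Nat.cast : Nat → Int)).zip
          (((pvScan c ws).map (Nat.cast : Nat → Int)).tail)).map
        (fun ab => if (ty ++ "0") ∈ PySem.List.slice f (some ab.1) (some ab.2) then ty ++ "0" else ty ++ "1")
      = pvGo ty ws (f.drop c) := by
  induction ws with
  | nil => intro c f; simp [pvScan, pvGo]
  | cons w ws ih =>
    intro c f
    obtain ⟨t, ht⟩ := pvScan_head (c + (pvSplit w).length) ws
    have hmap : List.map (Nat.cast : Nat → Int) (pvScan c (w :: ws)) =
        (c : Int) :: List.map Nat.cast (pvScan (c + (pvSplit w).length) ws) := by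
      simp [pvScan]
    rw [hmap, ht]
    simp only [List.map_cons, List.tail_cons, List.zip_cons_cons, pvGo]
    congr 1
    · rw [show (((c + (pvSplit w).length : Nat)) : Int)
            = (c : Int) + ((pvSplit w).length : Int) by push_cast; ring,
        PySem.List.slice_natCast_add]
    · have hih := ih (c + (pvSplit w).length) f
      rw [ht] at hih
      simp only [List.map_cons, List.tail_cons] at hih
      rw [hih, List.drop_drop, Nat.add_comm]

theorem pvA_eq (os f : List String) (ty : String) :
    recover_feature os f ty = pvGo ty os f := by
  unfold recover_feature
  simpa using pvA_foldl ty os f []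

theorem pvB_eq (os f : List String) (ty : String) :
    recover_feature_alt os f ty = pvGo ty os f := by
  have hb := pvBounds_eq os [] 0
  simp only [List.nil_append, Nat.cast_zero] at hb
  have hm := pvB_main ty os 0 f
  simp only [List.drop_zero] at hm
  simp only [recover_feature_alt, PySem.List.slice_from_one, hb]
  exact hm

-- ===== VERDICT (by name: the statement is the Claim_ definition above) =====
theorem recover_feature_spec : Claim_equal_recover_feature := by
  intro os f ty _
  unfold Spec_recover_feature
  rw [pvA_eq, pvB_eq]
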